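-- pv_equiv track=rewrite | github.com/John1987vlc/Ollash | backend/agents/auto_agent_phases/dynamic_documentation_phase.py | _prepend_entry
-- ===== SOURCE A (Python) =====
-- def _prepend_entry(existing: str, new_entry: str) -> str:
--     """Prepend *new_entry* before the first existing entry in a Keep-a-Changelog file."""
--     if not existing.strip():
--         header = "# Changelog\n\nAll notable changes to this project are documented here.\n\n"
--         return header + new_entry + "\n"
--     # Insert after the top-level header block (first blank line after any header)
--     lines = existing.splitlines(keepends=True)
--     insert_at = 0
--     for i, line in enumerate(lines):
--         if line.startswith("## "):
--             insert_at = i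
--             break
--         if line.strip() == "" and i > 0:
--             insert_at = i + 1
--     result = lines[:insert_at] + [new_entry + "\n"] + lines[insert_at:]
--     return "".join(result)
-- ===== SOURCE B (Python) =====
-- def _prepend_entry(existing: str, new_entry: str) -> str:
--     """Prepend *new_entry* before the first existing entry in a Keep-a-Changelog file."""
--     if not existing.strip():
--         header = "# Changelog\n\nAll notable changes to this project are documented here.\n\n"
--         return header + new_entry + "\n"
--     lines = existing.splitlines(keepends=True)
--     # Two explicit searches instead of one fused stateful scan:
--     # the first '## ' heading wins; otherwise insert after the LAST blank line
--     # at a positive index; otherwise at the top.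
--     insert_at = next((i for i, line in enumerate(lines) if line.startswith("## ")), None)
--     if insert_at is None:
--         insert_at = next((i + 1 for i, line in reversed(list(enumerate(lines)))
--                           if i > 0 and line.strip() == ""), 0)
--     return "".join(lines[:insert_at]) + new_entry + "\n" + "".join(lines[insert_at:])
-- ===== Notes on version B (the rewrite author's own statement) =====
-- stated objective: simpler
-- what changed: Replaces the fused stateful scan (loop carrying insert_at with a break) by two declarative searches: first heading index via next/enumerate, else last positive-index blank line via a reversed enumerate, then splices with string concatenation.
import Mathlib
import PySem

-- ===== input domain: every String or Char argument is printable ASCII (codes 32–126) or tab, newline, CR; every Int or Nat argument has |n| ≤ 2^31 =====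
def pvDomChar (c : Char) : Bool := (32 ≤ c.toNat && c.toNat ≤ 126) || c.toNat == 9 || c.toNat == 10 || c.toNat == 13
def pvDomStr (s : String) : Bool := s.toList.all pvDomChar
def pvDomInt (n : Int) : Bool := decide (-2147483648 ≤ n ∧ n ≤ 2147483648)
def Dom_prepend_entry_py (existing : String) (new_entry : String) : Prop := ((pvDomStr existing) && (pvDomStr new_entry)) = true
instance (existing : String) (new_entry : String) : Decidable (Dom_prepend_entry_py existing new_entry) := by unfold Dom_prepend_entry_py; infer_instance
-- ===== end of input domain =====

-- B replaces A's fused stateful scan by two declarative searches (first heading, else last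
-- positive-index blank line); objective: simpler, same return value.

-- shared helper: str.splitlines(keepends=True), exact on the domain's line breaks ('\n', '\r', '\r\n')
def pvSplitAux (cur : List Char) : List Char → List (List Char)
  | [] => if cur.isEmpty then [] else [cur.reverse]
  | '\r' :: '\n' :: rest => (cur.reverse ++ ['\r', '\n']) :: pvSplitAux [] rest
  | '\r' :: rest => (cur.reverse ++ ['\r']) :: pvSplitAux [] rest
  | '\n' :: rest => (cur.reverse ++ ['\n']) :: pvSplitAux [] rest
  | c :: rest => pvSplitAux (c :: cur) rest

def pvSplitKeep (cs : List Char) : List (List Char) := pvSplitAux [] cs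

def pvHeadP (l : List Char) : Bool := PySem.Chars.startswith l ['#', '#', ' ']

def pvBlankP (l : List Char) : Bool := (PySem.Chars.strip l).isEmpty

def pvHeader : List Char :=
  "# Changelog\n\nAll notable changes to this project are documented here.\n\n".toList

-- ===== PORT A =====
-- the 'for i, line in enumerate(lines): … break …' loop carrying insert_at
def pvScanA (i : Nat) (ins : Nat) : List (List Char) → Nat
  | [] => ins
  | l :: rest =>
    if pvHeadP l then i
    else if pvBlankP l && decide (0 < i) then pvScanA (i + 1) (i + 1) rest
    else pvScanA (i + 1) ins rest

def prepend_entry_py (existing : String) (new_entry : String) : String :=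
  if (PySem.Chars.strip existing.toList).isEmpty then
    String.ofList (pvHeader ++ new_entry.toList ++ ['\n'])
  else
    let lines := pvSplitKeep existing.toList
    let insert_at := pvScanA 0 0 lines
    String.ofList ((lines.take insert_at ++ [new_entry.toList ++ ['\n']] ++ lines.drop insert_at).flatten)

-- ===== PORT B =====
-- 'next((i+1 for i, line in reversed(list(enumerate(lines))) if i > 0 and line.strip() == ""), 0)'
def pvLastBlank (lines : List (List Char)) : Option Nat :=
  (lines.zipIdx.reverse.find? (fun p => decide (0 < p.2) && pvBlankP p.1)).map (fun p => p.2 + 1)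

def prepend_entry_py_alt (existing : String) (new_entry : String) : String :=
  if (PySem.Chars.strip existing.toList).isEmpty then
    String.ofList (pvHeader ++ new_entry.toList ++ ['\n'])
  else
    let lines := pvSplitKeep existing.toList
    let insert_at :=
      match lines.findIdx? pvHeadP with
      | some i => i
      | none => (pvLastBlank lines).getD 0
    String.ofList ((lines.take insert_at).flatten ++ new_entry.toList ++ '\n' :: (lines.drop insert_at).flatten)

-- ===== PRECONDITION & SPEC =====
def Spec_prepend_entry_py (existing : String) (new_entry : String) (out : String) : Prop := out = prepend_entry_py_alt existing new_entry
instance (existing : String) (new_entry : String) (out : String) : Decidable (Spec_prepend_entry_py existing new_entry out) := by unfold Spec_prepend_entry_py; infer_instance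

-- ===== CLAIM (what is proved, stated in full; the proofs are below) =====
def Claim_equal_prepend_entry_py : Prop := ∀ (existing : String) (new_entry : String), Dom_prepend_entry_py existing new_entry → Spec_prepend_entry_py existing new_entry (prepend_entry_py existing new_entry)

-- ===== LEMMAS AND PROOFS =====

-- A's scan, characterised over an arbitrary suffix with running index i and accumulator ins
theorem pvScanA_char (lines : List (List Char)) : ∀ (i ins : Nat),
    pvScanA i ins lines =
      match (lines.zipIdx i).find? (fun p => pvHeadP p.1) with
      | some p => p.2
      | none =>
        match (lines.zipIdx i).reverse.find? (fun p => decide (0 < p.2) && pvBlankP p.1) with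
        | some p => p.2 + 1
        | none => ins := by
  induction lines with
  | nil => intro i ins; simp [pvScanA]
  | cons l rest ih =>
    intro i ins
    by_cases hh : pvHeadP l = true
    · simp [pvScanA, hh]
    · have hh' : pvHeadP l = false := by simpa using hh
      by_cases hb : (pvBlankP l && decide (0 < i)) = true
      · simp only [pvScanA, hh', Bool.false_eq_true, if_false, hb, if_true]
        rw [ih (i + 1) (i + 1)]
        simp only [List.zipIdx_cons, List.find?_cons, hh', List.reverse_cons,
          List.find?_append]
        cases hfi : (rest.zipIdx (i + 1)).find? (fun p => pvHeadP p.1) with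
        | some p => rfl
        | none =>
          cases hbl : (rest.zipIdx (i + 1)).reverse.find? (fun p => decide (0 < p.2) && pvBlankP p.1) with
          | some p => simp
          | none => rw [Bool.and_comm] at hb; simp [hb]
      · have hb' : (pvBlankP l && decide (0 < i)) = false := by simpa using hb
        simp only [pvScanA, hh', Bool.false_eq_true, if_false, hb', if_false]
        rw [ih (i + 1) ins]
        simp only [List.zipIdx_cons, List.find?_cons, hh', List.reverse_cons,
          List.find?_append]
        cases hfi : (rest.zipIdx (i + 1)).find? (fun p => pvHeadP p.1) with
        | some p => rfl
        | none =>
          cases hbl : (rest.zipIdx (i + 1)).reverse.find? (fun p => decide (0 < p.2) && pvBlankP p.1) with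
          | some p => simp
          | none => rw [Bool.and_comm] at hb'; simp [hb']

-- bridge: find? over zipIdx projected to the index is findIdx? shifted
theorem pvZipFindHead (lines : List (List Char)) : ∀ (i : Nat),
    ((lines.zipIdx i).find? (fun p => pvHeadP p.1)).map (·.2)
      = (lines.findIdx? pvHeadP).map (· + i) := by
  induction lines with
  | nil => intro i; simp
  | cons l rest ih =>
    intro i
    by_cases hh : pvHeadP l = true
    · simp [hh, List.findIdx?_cons]
    · have hh' : pvHeadP l = false := by simpa using hh
      simp only [List.zipIdx_cons, List.find?_cons, hh', List.findIdx?_cons,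
        Bool.false_eq_true, if_false]
      rw [ih (i + 1)]
      cases (rest.findIdx? pvHeadP) with
      | none => simp
      | some k => simp [Nat.add_assoc, Nat.add_comm 1 i]

-- the two insertion-point computations agree
theorem pvInsertEq (lines : List (List Char)) :
    pvScanA 0 0 lines =
      (match lines.findIdx? pvHeadP with
       | some i => i
       | none => (pvLastBlank lines).getD 0) := by
  rw [pvScanA_char lines 0 0]
  have hbr := pvZipFindHead lines 0
  cases hfi : (lines.zipIdx 0).find? (fun p => pvHeadP p.1) with
  | some p =>
    rw [hfi] at hbr
    cases hidx : lines.findIdx? pvHeadP with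
    | none => rw [hidx] at hbr; simp at hbr
    | some k => rw [hidx] at hbr; simp at hbr; simp [hbr]
  | none =>
    rw [hfi] at hbr
    cases hidx : lines.findIdx? pvHeadP with
    | some k => rw [hidx] at hbr; simp at hbr
    | none =>
      simp only [pvLastBlank]
      have : lines.zipIdx = lines.zipIdx 0 := rfl
      rw [this]
      cases hbl : (lines.zipIdx 0).reverse.find? (fun p => decide (0 < p.2) && pvBlankP p.1) with
      | some p => simp
      | none => simp

-- ===== VERDICT (by name: the statement is the Claim_ definition above) =====
theorem prepend_entry_py_spec : Claim_equal_prepend_entry_py := by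
  intro existing new_entry _hdom
  unfold Spec_prepend_entry_py prepend_entry_py prepend_entry_py_alt
  by_cases hs : (PySem.Chars.strip existing.toList).isEmpty = true
  · simp [hs]
  · have hs' : (PySem.Chars.strip existing.toList).isEmpty = false := by simpa using hs
    simp only [hs', Bool.false_eq_true, if_false]
    rw [pvInsertEq (pvSplitKeep existing.toList)]
    congr 1
    simp
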